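-- pv_equiv track=rewrite | github.com/Charlie064/Nand2Tetris | chips/P6_hack_assembler.py | is_valid_a_instruction
-- ===== SOURCE A (Python) =====
-- def is_valid_a_instruction(line):
--     """
--     Checks whether a line has the basic structure of an A-instruction.
--
--     Args:
--         line (str): Source line
--
--     Returns:
--         bool: True if line starts with '@' and has content with allowed symbols
--     """
--     if not line.startswith("@") or len(line) < 2:
--         return False
--
--     token = line[1:]
--
--     if token.isdigit():
--         return True
--
--     allowed_first_chars = "ABCDEFGHIJKLMNOPQRSTUVWXYZabdcefghijklmnopqrstuvwxyz_.$"
--     allowed_chars = allowed_first_chars + "0123456789"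
--     if token[0] not in allowed_first_chars:
--         return False
--     for char in token[1:]:
--         if char not in allowed_chars:
--             return False
--
--     return True
-- ===== SOURCE B (Python) =====
-- import re
--
-- _A_TOKEN = re.compile(r'[A-Za-z_.$][A-Za-z0-9_.$]*')
--
-- def is_valid_a_instruction(line):
--     if not line.startswith("@") or len(line) < 2:
--         return False
--     token = line[1:]
--     if token.isdigit():
--         return True
--     return bool(_A_TOKEN.fullmatch(token))
-- ===== Notes on version B (the rewrite author's own statement) =====
-- stated objective: idiomatic
-- what changed: Replaced the first-char membership test plus the per-character rejection loop over hand-written allowed-character strings with one anchored regex fullmatch of [A-Za-z_.$][A-Za-z0-9_.$]* on the token, keeping the @/length guard and the isdigit fast path.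
import Mathlib
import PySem

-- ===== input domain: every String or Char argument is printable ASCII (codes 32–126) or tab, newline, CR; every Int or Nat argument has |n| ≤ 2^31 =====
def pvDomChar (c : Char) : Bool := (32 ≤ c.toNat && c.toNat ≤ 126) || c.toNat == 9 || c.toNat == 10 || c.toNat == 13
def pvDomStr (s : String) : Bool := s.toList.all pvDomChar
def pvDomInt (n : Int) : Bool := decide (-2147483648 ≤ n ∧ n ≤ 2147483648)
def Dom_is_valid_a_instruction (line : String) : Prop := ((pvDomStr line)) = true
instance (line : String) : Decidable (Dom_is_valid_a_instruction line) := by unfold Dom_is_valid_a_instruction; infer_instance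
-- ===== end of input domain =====

-- B replaces A's first-char membership test and per-character rejection loop by a single
-- anchored regex fullmatch over the same character classes (objective: idiomatic).

-- ===== PORT A =====
-- allowed_first_chars = "ABCDEFGHIJKLMNOPQRSTUVWXYZabdcefghijklmnopqrstuvwxyz_.$"
def aAllowedFirst : List Char := "ABCDEFGHIJKLMNOPQRSTUVWXYZabdcefghijklmnopqrstuvwxyz_.$".toList
-- allowed_chars = allowed_first_chars + "0123456789"
def aAllowed : List Char := aAllowedFirst ++ "0123456789".toList

-- 'for char in token[1:]: if char not in allowed_chars: return False' / final 'return True'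
def aLoop : List Char → Bool
  | [] => true
  | c :: rest => if !(aAllowed.contains c) then false else aLoop rest

def is_valid_a_instruction (line : String) : Bool :=
  -- if not line.startswith("@") or len(line) < 2: return False
  if !(PySem.Str.startswith line "@") || decide (PySem.Str.len line < 2) then false
  else
    -- token = line[1:]
    let token : List Char := PySem.List.slice line.toList (some 1) none
    -- if token.isdigit(): return True
    if PySem.Chars.strIsdigit token then true
    else
      match token with
      | [] => false  -- unreachable: len(line) ≥ 2 makes token nonempty (Python's token[0] never raises)
      | c :: rest =>
        -- if token[0] not in allowed_first_chars: return False
        if !(aAllowedFirst.contains c) then false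
        else aLoop rest

-- ===== PORT B =====
-- character class [A-Za-z_.$]
def bFirstClass (c : Char) : Bool :=
  (65 ≤ c.toNat && c.toNat ≤ 90) || (97 ≤ c.toNat && c.toNat ≤ 122) || c == '_' || c == '.' || c == '$'
-- character class [A-Za-z0-9_.$]
def bRestClass (c : Char) : Bool :=
  bFirstClass c || (48 ≤ c.toNat && c.toNat ≤ 57)

-- bool(re.fullmatch(r'[A-Za-z_.$][A-Za-z0-9_.$]*', token)): exact semantics of this anchored pattern
def bFullmatch : List Char → Bool
  | [] => false
  | c :: rest => bFirstClass c && rest.all bRestClass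

def is_valid_a_instruction_alt (line : String) : Bool :=
  if !(PySem.Str.startswith line "@") || decide (PySem.Str.len line < 2) then false
  else
    let token : List Char := PySem.List.slice line.toList (some 1) none
    if PySem.Chars.strIsdigit token then true
    else bFullmatch token

-- ===== PRECONDITION & SPEC =====
def Spec_is_valid_a_instruction (line : String) (out : Bool) : Prop := out = is_valid_a_instruction_alt line
instance (line : String) (out : Bool) : Decidable (Spec_is_valid_a_instruction line out) := by unfold Spec_is_valid_a_instruction; infer_instance

-- ===== CLAIM (what is proved, stated in full; the proofs are below) =====
def Claim_equal_is_valid_a_instruction : Prop := ∀ (line : String), Dom_is_valid_a_instruction line → Spec_is_valid_a_instruction line (is_valid_a_instruction line)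

-- ===== LEMMAS AND PROOFS =====

lemma aAllowedFirst_lit : aAllowedFirst = ['A', 'B', 'C', 'D', 'E', 'F', 'G', 'H', 'I', 'J', 'K', 'L', 'M', 'N', 'O', 'P', 'Q', 'R', 'S', 'T', 'U', 'V', 'W', 'X', 'Y', 'Z', 'a', 'b', 'd', 'c', 'e', 'f', 'g', 'h', 'i', 'j', 'k', 'l', 'm', 'n', 'o', 'p', 'q', 'r', 's', 't', 'u', 'v', 'w', 'x', 'y', 'z', '_', '.', '$'] := rfl

lemma aAllowed_lit : aAllowed = ['A', 'B', 'C', 'D', 'E', 'F', 'G', 'H', 'I', 'J', 'K', 'L', 'M', 'N', 'O', 'P', 'Q', 'R', 'S', 'T', 'U', 'V', 'W', 'X', 'Y', 'Z', 'a', 'b', 'd', 'c', 'e', 'f', 'g', 'h', 'i', 'j', 'k', 'l', 'm', 'n', 'o', 'p', 'q', 'r', 's', 't', 'u', 'v', 'w', 'x', 'y', 'z', '_', '.', '$', '0', '1', '2', '3', '4', '5', '6', '7', '8', '9'] := rfl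

-- membership in A's first-char string coincides with B's class [A-Za-z_.$]
lemma contains_first_eq (c : Char) : aAllowedFirst.contains c = bFirstClass c := by
  by_cases h : c ∈ aAllowedFirst
  · simp_all [aAllowedFirst_lit, bFirstClass, Char.ext_iff, UInt32.ext_iff]
    omega
  · simp_all [aAllowedFirst_lit, bFirstClass, Char.ext_iff, UInt32.ext_iff]
    omega

-- membership in A's allowed string coincides with B's class [A-Za-z0-9_.$]
lemma contains_rest_eq (c : Char) : aAllowed.contains c = bRestClass c := by
  by_cases h : c ∈ aAllowed
  · simp_all [aAllowed_lit, bRestClass, bFirstClass, Char.ext_iff, UInt32.ext_iff]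
    omega
  · simp_all [aAllowed_lit, bRestClass, bFirstClass, Char.ext_iff, UInt32.ext_iff]
    omega

-- A's rejection loop is B's List.all over the rest class
lemma aLoop_eq_all (cs : List Char) : aLoop cs = cs.all bRestClass := by
  induction cs with
  | nil => rfl
  | cons c rest ih =>
    simp only [aLoop, contains_rest_eq c, ih, List.all_cons]
    cases h : bRestClass c <;> simp

lemma tail_eq_fullmatch (cs : List Char) :
    (match cs with
     | [] => false
     | c :: rest => if !(aAllowedFirst.contains c) then false else aLoop rest)
    = bFullmatch cs := by
  cases cs with
  | nil => rfl
  | cons c rest =>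
    simp only [bFullmatch, contains_first_eq c, aLoop_eq_all]
    cases h : bFirstClass c <;> simp

-- ===== VERDICT (by name: the statement is the Claim_ definition above) =====
theorem is_valid_a_instruction_spec : Claim_equal_is_valid_a_instruction := by
  intro line _
  unfold Spec_is_valid_a_instruction
  dsimp only [is_valid_a_instruction, is_valid_a_instruction_alt]
  split
  · rfl
  · split
    · rfl
    · exact tail_eq_fullmatch _
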